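-- pv_equiv track=rewrite | github.com/Grazfather/glitcher | scripts/glitch.py | uu_decode
-- ===== SOURCE A (Python) =====
-- def uu_decode(uudata):
--     data = [ord(c) for c in uudata]
--     s0 = 0;
--     s1 = 0;
--     s2 = 0;
--
--     s0 = ((data[0]-32)<<2) & 0xff
--     s0 = s0 | (((data[1]-32)>>4) & 0x03)
--
--     s1 = ((data[1]-32)<<4) & 0xf0
--     s1 = s1 | (((data[2]-32)>>2) & 0x0f)
--
--     s2 =((data[2]-32)<<6) & 0xC0
--     s2 = s2 | (((data[3]-32))    & 0x3F)
--     return [s0, s1, s2]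
-- ===== SOURCE B (Python) =====
-- def uu_decode(uudata):
--     # Accumulate the four 6-bit groups into one 24-bit integer, then
--     # split it into three bytes arithmetically.
--     n = 0
--     for ch in (uudata[0], uudata[1], uudata[2], uudata[3]):
--         n = 64 * n + ((ord(ch) - 32) & 0x3f)
--     return [(n // 65536) % 256, (n // 256) % 256, n % 256]
-- ===== Notes on version B (the rewrite author's own statement) =====
-- stated objective: faster
-- what changed: B folds the four 6-bit groups into one 24-bit integer and splits it into the three bytes with //-and-% arithmetic, indexing only uudata[0..3] instead of A's ord-scan of the whole string followed by per-byte shift-and-mask surgery on overlapping character pairs.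
import Mathlib
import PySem

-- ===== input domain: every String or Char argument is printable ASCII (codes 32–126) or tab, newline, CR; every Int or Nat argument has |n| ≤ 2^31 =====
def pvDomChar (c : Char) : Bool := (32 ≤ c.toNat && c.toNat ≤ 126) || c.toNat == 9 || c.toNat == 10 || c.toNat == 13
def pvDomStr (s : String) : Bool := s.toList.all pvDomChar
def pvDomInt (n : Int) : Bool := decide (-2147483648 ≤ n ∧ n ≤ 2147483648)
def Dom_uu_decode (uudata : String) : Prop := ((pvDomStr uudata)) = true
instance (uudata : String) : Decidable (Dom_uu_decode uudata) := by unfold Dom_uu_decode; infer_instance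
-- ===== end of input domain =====

-- B assembles the four 6-bit groups into one 24-bit integer and splits it into three
-- bytes arithmetically, indexing only uudata[0..3] instead of A's whole-string ord scan.

-- ===== PORT A =====
def uu_decode (uudata : String) : List Int :=
  let data : List Int := uudata.toList.map (fun c => (c.toNat : Int))
  match PySem.List.pyGet? data 0, PySem.List.pyGet? data 1,
        PySem.List.pyGet? data 2, PySem.List.pyGet? data 3 with
  | some d0, some d1, some d2, some d3 =>
    let s0 := PySem.Int.band ((d0 - 32) <<< 2) 0xff
    let s0 := PySem.Int.bor s0 (PySem.Int.band ((d1 - 32) >>> 4) 0x03)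
    let s1 := PySem.Int.band ((d1 - 32) <<< 4) 0xf0
    let s1 := PySem.Int.bor s1 (PySem.Int.band ((d2 - 32) >>> 2) 0x0f)
    let s2 := PySem.Int.band ((d2 - 32) <<< 6) 0xC0
    let s2 := PySem.Int.bor s2 (PySem.Int.band (d3 - 32) 0x3F)
    [s0, s1, s2]
  | _, _, _, _ => []   -- IndexError: excluded by Pre_uu_decode

-- ===== PORT B =====
def uu_decode_alt (uudata : String) : List Int :=
  (((PySem.Str.pyGet? uudata 0).bind fun c0 =>
    (PySem.Str.pyGet? uudata 1).bind fun c1 =>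
    (PySem.Str.pyGet? uudata 2).bind fun c2 =>
    (PySem.Str.pyGet? uudata 3).bind fun c3 =>
    let n := [c0, c1, c2, c3].foldl
      (fun n ch => 64 * n + PySem.Int.band ((ch.toNat : Int) - 32) 0x3f) 0
    some [PySem.Int.mod (PySem.Int.floordiv n 65536) 256,
          PySem.Int.mod (PySem.Int.floordiv n 256) 256,
          PySem.Int.mod n 256]).getD [])   -- none = IndexError: excluded by Pre_uu_decode

-- ===== PRECONDITION & SPEC =====
-- A raises IndexError on strings shorter than 4 characters; Pre_ excludes exactly those.
def Pre_uu_decode (uudata : String) : Prop := 4 ≤ uudata.toList.length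
instance (uudata : String) : Decidable (Pre_uu_decode uudata) := by unfold Pre_uu_decode; infer_instance
def pvWitness_uu_decode : String := "0V%T"

def Spec_uu_decode (uudata : String) (out : List Int) : Prop := out = uu_decode_alt uudata
instance (uudata : String) (out : List Int) : Decidable (Spec_uu_decode uudata out) := by unfold Spec_uu_decode; infer_instance

-- ===== CLAIM (what is proved, stated in full; the proofs are below) =====
def Claim_equal_uu_decode : Prop := ∀ (uudata : String), Dom_uu_decode uudata → Pre_uu_decode uudata → Spec_uu_decode uudata (uu_decode uudata)

-- ===== LEMMAS AND PROOFS =====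

-- the character codes Dom admits
def pvCodes : List Nat := [9, 10, 13] ++ List.range' 32 95

-- per-pair bridge from A's bitwise byte surgery to arithmetic on the 6-bit groups
def pvP (x y : Nat) : Bool :=
  let x' := PySem.Int.band ((x : Int) - 32) 63
  let y' := PySem.Int.band ((y : Int) - 32) 63
  (PySem.Int.bor (PySem.Int.band (((x : Int) - 32) <<< 2) 255) (PySem.Int.band (((y : Int) - 32) >>> 4) 3)
      == 4 * x' + PySem.Int.floordiv y' 16)
  && (PySem.Int.bor (PySem.Int.band (((x : Int) - 32) <<< 4) 240) (PySem.Int.band (((y : Int) - 32) >>> 2) 15)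
      == PySem.Int.mod x' 16 * 16 + PySem.Int.floordiv y' 4)
  && (PySem.Int.bor (PySem.Int.band (((x : Int) - 32) <<< 6) 192) (PySem.Int.band ((y : Int) - 32) 63)
      == PySem.Int.mod x' 4 * 64 + y')
  && (decide (0 ≤ x') && decide (x' < 64))

set_option maxRecDepth 100000 in
lemma pvKey : ∀ x ∈ pvCodes, ∀ y ∈ pvCodes, pvP x y = true := by decide

lemma pvGet {α : Type} (a b c d : α) (t : List α) :
    ((PySem.List.pyIdx? (a :: b :: c :: d :: t).length 0).bind fun i => (a :: b :: c :: d :: t)[i]?) = some a ∧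
    ((PySem.List.pyIdx? (a :: b :: c :: d :: t).length 1).bind fun i => (a :: b :: c :: d :: t)[i]?) = some b ∧
    ((PySem.List.pyIdx? (a :: b :: c :: d :: t).length 2).bind fun i => (a :: b :: c :: d :: t)[i]?) = some c ∧
    ((PySem.List.pyIdx? (a :: b :: c :: d :: t).length 3).bind fun i => (a :: b :: c :: d :: t)[i]?) = some d := by
  refine ⟨?_, ?_, ?_, ?_⟩ <;>
    (simp [PySem.List.pyIdx?]; rw [if_pos (by omega)]; simp)

lemma pvCodeOfChar (c : Char) (h : pvDomChar c = true) : c.toNat ∈ pvCodes := by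
  simp [pvDomChar] at h
  simp [pvCodes, List.mem_range'_1]
  omega

-- ===== VERDICT (by name: the statement is the Claim_ definition above) =====
theorem uu_decode_spec : Claim_equal_uu_decode := by
  intro u hdom hpre
  unfold Spec_uu_decode
  obtain ⟨c0, c1, c2, c3, t, hl⟩ : ∃ c0 c1 c2 c3 t, u.toList = c0 :: c1 :: c2 :: c3 :: t := by
    unfold Pre_uu_decode at hpre
    match hL : u.toList with
    | a :: b :: c :: d :: t => exact ⟨a, b, c, d, t, rfl⟩
    | [] | [_] | [_, _] | [_, _, _] => rw [hL] at hpre; simp at hpre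
  unfold Dom_uu_decode pvDomStr at hdom
  rw [hl] at hdom
  simp [List.all_cons] at hdom
  obtain ⟨h0, h1, h2, h3, -⟩ := hdom
  have P01 := pvKey _ (pvCodeOfChar c0 h0) _ (pvCodeOfChar c1 h1)
  have P12 := pvKey _ (pvCodeOfChar c1 h1) _ (pvCodeOfChar c2 h2)
  have P23 := pvKey _ (pvCodeOfChar c2 h2) _ (pvCodeOfChar c3 h3)
  have P33 := pvKey _ (pvCodeOfChar c3 h3) _ (pvCodeOfChar c3 h3)
  simp only [pvP, Bool.and_eq_true, beq_iff_eq, decide_eq_true_eq] at P01 P12 P23 P33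
  obtain ⟨⟨⟨e0, -⟩, -⟩, hx0, hx0'⟩ := P01
  obtain ⟨⟨⟨-, e1⟩, -⟩, hx1, hx1'⟩ := P12
  obtain ⟨⟨⟨-, -⟩, e2⟩, hx2, hx2'⟩ := P23
  obtain ⟨-, hx3, hx3'⟩ := P33
  obtain ⟨gA0, gA1, gA2, gA3⟩ := pvGet ((c0.toNat : Int)) ((c1.toNat : Int)) ((c2.toNat : Int)) ((c3.toNat : Int)) (t.map fun c => (c.toNat : Int))
  obtain ⟨gB0, gB1, gB2, gB3⟩ := pvGet c0 c1 c2 c3 t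
  simp only [uu_decode, uu_decode_alt, hl, List.map_cons, PySem.Str.pyGet?, PySem.Chars.pyGet?,
    PySem.List.pyGet?, List.foldl]
  rw [gA0, gA1, gA2, gA3, gB0, gB1, gB2, gB3]
  dsimp only [Option.bind, Option.getD]
  rw [e0, e1, e2]
  simp only [PySem.Int.floordiv_eq_ediv_of_pos (by norm_num : (0:Int) < 4),
    PySem.Int.floordiv_eq_ediv_of_pos (by norm_num : (0:Int) < 16),
    PySem.Int.floordiv_eq_ediv_of_pos (by norm_num : (0:Int) < 256),
    PySem.Int.floordiv_eq_ediv_of_pos (by norm_num : (0:Int) < 65536),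
    PySem.Int.mod_eq_emod_of_pos (by norm_num : (0:Int) < 4),
    PySem.Int.mod_eq_emod_of_pos (by norm_num : (0:Int) < 16),
    PySem.Int.mod_eq_emod_of_pos (by norm_num : (0:Int) < 256)]
  set x0 := PySem.Int.band ((c0.toNat : Int) - 32) 63 with hX0
  set x1 := PySem.Int.band ((c1.toNat : Int) - 32) 63 with hX1
  set x2 := PySem.Int.band ((c2.toNat : Int) - 32) 63 with hX2
  set x3 := PySem.Int.band ((c3.toNat : Int) - 32) 63 with hX3
  simp only [List.cons.injEq, and_true]
  refine ⟨by omega, by omega, by omega⟩
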